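-- pv_equiv track=rewrite | github.com/angusthompson/grid_game | population_simulation_2.py | update_population_caps
-- ===== SOURCE A (Python) =====
-- def count_coast_adjacency(terrain_grid, x, y):
--     count = 0
--     for dy in range(-1, 2):
--         for dx in range(-1, 2):
--             nx, ny = x + dx, y + dy
--             if (dx != 0 or dy != 0) and 0 <= nx < len(terrain_grid[0]) and 0 <= ny < len(terrain_grid):
--                 if terrain_grid[ny][nx] == 1:  # Sea tile
--                     count += 1
--     return count
--
-- def count_farmland_adjacency(terrain_grid, x, y):
--     count = 0
--     for dy in range(-1, 2):
--         for dx in range(-1, 2):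
--             nx, ny = x + dx, y + dy
--             if (dx != 0 or dy != 0) and 0 <= nx < len(terrain_grid[0]) and 0 <= ny < len(terrain_grid):
--                 if terrain_grid[ny][nx] == 6:  # Farmland tile
--                     count += 1
--     return count
--
-- def update_population_caps(initial_population_caps, terrain_grid, farmland_adjacency):
--     population_caps = initial_population_caps.copy()
--     for y in range(len(terrain_grid)):
--         for x in range(len(terrain_grid[y])):
--             if terrain_grid[y][x] == 2:  # Town tile
--                 population_caps[y][x] += 3 * count_coast_adjacency(terrain_grid, x, y) + 5
--             if terrain_grid[y][x] == 5:
--                 population_caps[y][x] += 3 * count_coast_adjacency(terrain_grid, x, y) + 5 * count_farmland_adjacency(terrain_grid, x, y)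
--     return population_caps
-- ===== SOURCE B (Python) =====
-- def update_population_caps(initial_population_caps, terrain_grid, farmland_adjacency):
--     # Scatter formulation: instead of counting neighbors per town (gather),
--     # add a flat +5 to every town (type-2) cell, then let every sea tile (1)
--     # push +3 to each adjacent town (2 or 5) and every farmland tile (6)
--     # push +5 to each adjacent type-5 town.  Return value only; does not
--     # mutate the caller's rows (A mutates them through a shallow copy).
--     population_caps = [row[:] for row in initial_population_caps]
--     h = len(terrain_grid)
--     w = len(terrain_grid[0]) if terrain_grid else 0
--     for y in range(h):
--         for x in range(len(terrain_grid[y])):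
--             if terrain_grid[y][x] == 2:
--                 population_caps[y][x] += 5
--     for sy in range(h):
--         for sx in range(len(terrain_grid[sy])):
--             v = terrain_grid[sy][sx]
--             if v == 1 or v == 6:
--                 for dy in (-1, 0, 1):
--                     for dx in (-1, 0, 1):
--                         if dy == 0 and dx == 0:
--                             continue
--                         ty, tx = sy + dy, sx + dx
--                         if 0 <= ty < h and 0 <= tx < w:
--                             t = terrain_grid[ty][tx]
--                             if v == 1 and (t == 2 or t == 5):
--                                 population_caps[ty][tx] += 3
--                             elif v == 6 and t == 5:
--                                 population_caps[ty][tx] += 5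
--     return population_caps
-- ===== Notes on version B (the rewrite author's own statement) =====
-- stated objective: alternative
-- what changed: Replaces A's per-town gather (each town cell re-scans its whole neighborhood through two helper counters) with a scatter pass: a flat +5 for every type-2 town, then every sea tile pushes +3 and every farmland tile +5 onto its adjacent towns, accumulating directly in population_caps.
-- outside the precondition, e.g. on update_population_caps([[0]], [[2], [3, 1]], 0): A returns [[5]], B returns [[8]]
import Mathlib
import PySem

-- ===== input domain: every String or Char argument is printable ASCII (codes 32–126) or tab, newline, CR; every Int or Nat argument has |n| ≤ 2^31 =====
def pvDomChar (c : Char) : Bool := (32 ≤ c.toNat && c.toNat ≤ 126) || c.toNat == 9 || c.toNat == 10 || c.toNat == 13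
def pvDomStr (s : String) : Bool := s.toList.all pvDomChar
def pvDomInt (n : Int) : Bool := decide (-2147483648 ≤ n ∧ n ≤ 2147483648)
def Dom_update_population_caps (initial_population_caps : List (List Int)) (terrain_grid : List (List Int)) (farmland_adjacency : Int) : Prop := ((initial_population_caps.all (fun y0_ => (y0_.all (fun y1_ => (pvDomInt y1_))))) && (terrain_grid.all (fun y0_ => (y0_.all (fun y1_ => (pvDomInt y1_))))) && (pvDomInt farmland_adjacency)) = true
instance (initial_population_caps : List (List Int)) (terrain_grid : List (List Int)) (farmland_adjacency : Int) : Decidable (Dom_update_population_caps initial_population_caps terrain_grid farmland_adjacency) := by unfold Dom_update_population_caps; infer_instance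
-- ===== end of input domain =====

-- B replaces A's per-town neighborhood gather by a scatter pass (flat +5 per type-2 town,
-- then each sea/farmland tile pushes its weight onto adjacent towns); return value only —
-- A mutates the rows of initial_population_caps through its shallow copy, B does not.

-- ===== PORT A =====
-- len(terrain_grid[0]); Python would raise on an empty grid, but every call site
-- guarantees a nonempty grid, so the total getD form is exact where it is reached.
def pvW (grid : List (List Int)) : Int := ((grid.getD 0 []).length : Int)

-- grid[ny][nx] (both indices are nonnegative and in range at every reached use under Pre_)
def pvRead (grid : List (List Int)) (ny nx : Int) : Int :=
  PySem.List.pyGetD (PySem.List.pyGetD grid ny []) nx 0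

-- caps[y][x] += v (in range at every reached use under Pre_)
def pvAddAt (g : List (List Int)) (y x : Nat) (v : Int) : List (List Int) :=
  g.modify y (fun row => row.modify x (fun c => c + v))

-- range(-1, 2)
def pvOffsets : List Int := [-1, 0, 1]

-- common body of Python's count_coast_adjacency / count_farmland_adjacency (tile value v)
def pvCountAdj (terrain_grid : List (List Int)) (v : Int) (x y : Int) : Int :=
  pvOffsets.foldl (fun count dy =>
    pvOffsets.foldl (fun count dx =>
      let nx := x + dx
      let ny := y + dy
      if (dx ≠ 0 ∨ dy ≠ 0) ∧ 0 ≤ nx ∧ nx < pvW terrain_grid ∧ 0 ≤ ny ∧ ny < (terrain_grid.length : Int) then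
        (if pvRead terrain_grid ny nx = v then count + 1 else count)
      else count) count) 0

def count_coast_adjacency (terrain_grid : List (List Int)) (x y : Int) : Int :=
  pvCountAdj terrain_grid 1 x y

def count_farmland_adjacency (terrain_grid : List (List Int)) (x y : Int) : Int :=
  pvCountAdj terrain_grid 6 x y

def update_population_caps (initial_population_caps : List (List Int)) (terrain_grid : List (List Int)) (farmland_adjacency : Int) : List (List Int) :=
  (List.range terrain_grid.length).foldl (fun pc y =>
    (List.range ((terrain_grid.getD y []).length)).foldl (fun pc x =>
      let t := (terrain_grid.getD y []).getD x 0
      let pc1 := if t = 2 then pvAddAt pc y x (3 * count_coast_adjacency terrain_grid (x : Int) (y : Int) + 5) else pc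
      if t = 5 then pvAddAt pc1 y x (3 * count_coast_adjacency terrain_grid (x : Int) (y : Int) + 5 * count_farmland_adjacency terrain_grid (x : Int) (y : Int)) else pc1) pc) initial_population_caps

-- ===== PORT B =====
def update_population_caps_alt (initial_population_caps : List (List Int)) (terrain_grid : List (List Int)) (farmland_adjacency : Int) : List (List Int) :=
  let h := terrain_grid.length
  let base := (List.range h).foldl (fun pc y =>
    (List.range ((terrain_grid.getD y []).length)).foldl (fun pc x =>
      if (terrain_grid.getD y []).getD x 0 = 2 then pvAddAt pc y x 5 else pc) pc) initial_population_caps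
  (List.range h).foldl (fun pc sy =>
    (List.range ((terrain_grid.getD sy []).length)).foldl (fun pc sx =>
      let v := (terrain_grid.getD sy []).getD sx 0
      if v = 1 ∨ v = 6 then
        pvOffsets.foldl (fun pc dy =>
          pvOffsets.foldl (fun pc dx =>
            if dy = 0 ∧ dx = 0 then pc
            else
              let ty := (sy : Int) + dy
              let tx := (sx : Int) + dx
              if 0 ≤ ty ∧ ty < (h : Int) ∧ 0 ≤ tx ∧ tx < pvW terrain_grid then
                let t := pvRead terrain_grid ty tx
                if v = 1 ∧ (t = 2 ∨ t = 5) then pvAddAt pc ty.toNat tx.toNat 3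
                else if v = 6 ∧ t = 5 then pvAddAt pc ty.toNat tx.toNat 5
                else pc
              else pc) pc) pc
      else pc) pc) base

-- ===== PRECONDITION & SPEC =====
-- Pre_ excludes ragged terrain grids (A bounds neighbor columns by row 0's width while
-- indexing other rows, so it can raise IndexError or count neighbors accidentally) and
-- grids with a town cell (2 or 5) outside the extent of initial_population_caps, where
-- A raises IndexError.
def Pre_update_population_caps (initial_population_caps : List (List Int)) (terrain_grid : List (List Int)) (farmland_adjacency : Int) : Prop :=
  (∀ row ∈ terrain_grid, row.length = (terrain_grid.getD 0 []).length) ∧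
  (∀ y < terrain_grid.length, ∀ x < (terrain_grid.getD y []).length,
     ((terrain_grid.getD y []).getD x 0 = 2 ∨ (terrain_grid.getD y []).getD x 0 = 5) →
     y < initial_population_caps.length ∧ x < (initial_population_caps.getD y []).length)

instance (initial_population_caps : List (List Int)) (terrain_grid : List (List Int)) (farmland_adjacency : Int) : Decidable (Pre_update_population_caps initial_population_caps terrain_grid farmland_adjacency) := by
  unfold Pre_update_population_caps; infer_instance

def pvWitness_update_population_caps : List (List Int) × List (List Int) × Int :=
  ([[0, 0], [0, 0]], [[2, 1], [6, 5]], 0)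

def Spec_update_population_caps (initial_population_caps : List (List Int)) (terrain_grid : List (List Int)) (farmland_adjacency : Int) (out : List (List Int)) : Prop := out = update_population_caps_alt initial_population_caps terrain_grid farmland_adjacency
instance (initial_population_caps : List (List Int)) (terrain_grid : List (List Int)) (farmland_adjacency : Int) (out : List (List Int)) : Decidable (Spec_update_population_caps initial_population_caps terrain_grid farmland_adjacency out) := by unfold Spec_update_population_caps; infer_instance

-- ===== CLAIM (what is proved, stated in full; the proofs are below) =====
def Claim_equal_update_population_caps : Prop := ∀ (initial_population_caps : List (List Int)) (terrain_grid : List (List Int)) (farmland_adjacency : Int), Dom_update_population_caps initial_population_caps terrain_grid farmland_adjacency → Pre_update_population_caps initial_population_caps terrain_grid farmland_adjacency → Spec_update_population_caps initial_population_caps terrain_grid farmland_adjacency (update_population_caps initial_population_caps terrain_grid farmland_adjacency)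

-- ===== LEMMAS AND PROOFS =====

-- cell (y, x) of a grid, with default 0
def pvCell (g : List (List Int)) (y x : Nat) : Int := (g.getD y []).getD x 0

-- b has the same row structure as a
def pvShape (a b : List (List Int)) : Prop :=
  b.length = a.length ∧ ∀ y : Nat, (b.getD y []).length = (a.getD y []).length

theorem pvRead_nonneg (grid : List (List Int)) (a b : Int) (ha : 0 ≤ a) (hb : 0 ≤ b) :
    pvRead grid a b = pvCell grid a.toNat b.toNat := by
  obtain ⟨n, rfl⟩ := Int.eq_ofNat_of_zero_le ha
  obtain ⟨m, rfl⟩ := Int.eq_ofNat_of_zero_le hb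
  simp [pvRead, pvCell, PySem.List.pyGetD_natCast]

theorem pvAddAt_length (g : List (List Int)) (y x : Nat) (v : Int) :
    (pvAddAt g y x v).length = g.length := by
  simp [pvAddAt]

theorem pvAddAt_getD_len (g : List (List Int)) (y x : Nat) (v : Int) (y' : Nat) :
    ((pvAddAt g y x v).getD y' []).length = (g.getD y' []).length := by
  simp only [pvAddAt, List.getD_eq_getElem?_getD, List.getElem?_modify]
  cases h : g[y']? with
  | none => simp
  | some row => by_cases hy : y = y' <;> simp [hy]

theorem pvAddAt_shape (g0 g : List (List Int)) (y x : Nat) (v : Int) (h : pvShape g0 g) :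
    pvShape g0 (pvAddAt g y x v) := by
  obtain ⟨h1, h2⟩ := h
  exact ⟨by rw [pvAddAt_length, h1], fun y' => by rw [pvAddAt_getD_len, h2]⟩

theorem pvAddAt_cell_ne (g : List (List Int)) (y x : Nat) (v : Int) (y' x' : Nat)
    (h : y' ≠ y ∨ x' ≠ x) : pvCell (pvAddAt g y x v) y' x' = pvCell g y' x' := by
  simp only [pvAddAt, pvCell, List.getD_eq_getElem?_getD, List.getElem?_modify]
  cases hg : g[y']? with
  | none => simp
  | some row =>
    by_cases hy : y = y'
    · subst hy
      rcases h with h | h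
      · omega
      · simp only [if_pos rfl, Option.map_some, Option.map_eq_map, Option.getD_some, if_true]
        rw [List.getElem?_modify]
        cases hr : row[x']? with
        | none => simp
        | some a =>
          simp only [Option.map_eq_map, Option.map_some, Option.getD_some]
          rw [if_neg (by omega)]
    · simp [hy]

theorem pvAddAt_cell_self (g : List (List Int)) (y x : Nat) (v : Int)
    (hy : y < g.length) (hx : x < (g.getD y []).length) :
    pvCell (pvAddAt g y x v) y x = pvCell g y x + v := by
  simp only [pvAddAt, pvCell, List.getD_eq_getElem?_getD, List.getElem?_modify]
  rw [List.getElem?_eq_getElem hy]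
  simp only [if_pos rfl, Option.map_some, Option.getD_some]
  rw [List.getD_eq_getElem?_getD, List.getElem?_eq_getElem hy] at hx
  simp only [Option.getD_some] at hx
  simp [List.getD_eq_getElem?_getD, List.getElem?_modify, List.getElem?_eq_getElem hx]

-- sum over a list, helper lemmas
theorem pvSum_zero {ι : Type} (l : List ι) (f : ι → Int) (h : ∀ i ∈ l, f i = 0) :
    (l.map f).sum = 0 := by
  induction l with
  | nil => simp
  | cons a l ih => simp [h a (by simp), ih (fun i hi => h i (by simp [hi]))]

theorem pvSum_add {ι : Type} (l : List ι) (f g : ι → Int) :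
    (l.map (fun i => f i + g i)).sum = (l.map f).sum + (l.map g).sum := by
  induction l with
  | nil => simp
  | cons a l ih => simp [ih]; ring

theorem pvSum_mul {ι : Type} (c : Int) (l : List ι) (f : ι → Int) :
    (l.map (fun i => c * f i)).sum = c * (l.map f).sum := by
  induction l with
  | nil => simp
  | cons a l ih => simp [ih]; ring

theorem pvSum_if_const {ι : Type} (P : Prop) [Decidable P] (l : List ι) (f : ι → Int) :
    (l.map (fun i => if P then f i else 0)).sum = if P then (l.map f).sum else 0 := by
  split <;> simp

theorem pvSum_comm {ι κ : Type} (l : List ι) (m : List κ) (f : ι → κ → Int) :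
    (l.map (fun i => (m.map (fun j => f i j)).sum)).sum
      = (m.map (fun j => (l.map (fun i => f i j)).sum)).sum := by
  induction l with
  | nil => simp [pvSum_zero]
  | cons a l ih => simp only [List.map_cons, List.sum_cons, ih, ← pvSum_add]

theorem pvSum_collapseN (n a : Nat) (f : Nat → Int) :
    ((List.range n).map (fun i => if i = a then f i else 0)).sum = if a < n then f a else 0 := by
  induction n with
  | zero => simp
  | succ n ih =>
    rw [List.range_succ, List.map_append, List.sum_append, ih]
    by_cases h : a = n
    · subst h; simp
    · have h2 : (a < n) ↔ (a < n + 1) := by omega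
      simp [show ¬ (n = a) from by omega, h2]

theorem pvSum_collapseZ (n : Nat) (σ : Int) (f : Nat → Int) :
    ((List.range n).map (fun (i : Nat) => if (i : Int) = σ then f i else 0)).sum
      = if 0 ≤ σ ∧ σ < (n : Int) then f σ.toNat else 0 := by
  induction n with
  | zero =>
    simp only [List.range_zero, List.map_nil, List.sum_nil]
    rw [if_neg (by omega)]
  | succ n ih =>
    rw [List.range_succ, List.map_append, List.sum_append, ih]
    simp only [List.map_cons, List.map_nil, List.sum_cons, List.sum_nil, add_zero]
    by_cases h : (n : Int) = σ
    · have hn : σ.toNat = n := by omega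
      rw [if_neg (show ¬(0 ≤ σ ∧ σ < (n : Int)) by omega), if_pos h,
          if_pos (show 0 ≤ σ ∧ σ < ((n + 1 : Nat) : Int) by push_cast; omega), hn]
      ring
    · rw [if_neg h]
      by_cases h2 : 0 ≤ σ ∧ σ < (n : Int)
      · rw [if_pos h2, if_pos (by omega)]; ring
      · rw [if_neg h2, if_neg (by omega)]; ring

-- generic pointwise characterization of a grid-updating foldl
theorem pvFoldl_cell {ι : Type} (g0 : List (List Int)) (step : List (List Int) → ι → List (List Int))
    (δ : ι → Nat → Nat → Int)
    (hstep : ∀ g i, pvShape g0 g → pvShape g0 (step g i) ∧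
      ∀ y x, pvCell (step g i) y x = pvCell g y x + δ i y x)
    (l : List ι) : ∀ g : List (List Int), pvShape g0 g →
      pvShape g0 (l.foldl step g) ∧
      ∀ y x, pvCell (l.foldl step g) y x = pvCell g y x + (l.map (fun i => δ i y x)).sum := by
  induction l with
  | nil => intro g hg; exact ⟨hg, fun y x => by simp⟩
  | cons a l ih =>
    intro g hg
    obtain ⟨h1, h2⟩ := hstep g a hg
    obtain ⟨h3, h4⟩ := ih (step g a) h1
    refine ⟨h3, fun y x => ?_⟩
    rw [List.foldl_cons, h4, h2]
    simp; ring

-- a fold that just accumulates an integer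
theorem pvFoldl_add (l : List Int) (F : Int → Int → Int) (u : Int → Int)
    (h : ∀ c e, F c e = c + u e) : ∀ a, l.foldl F a = a + (l.map u).sum := by
  induction l with
  | nil => simp
  | cons b l ih => intro a; rw [List.foldl_cons, h, ih]; simp; ring

theorem pvShape_refl (g : List (List Int)) : pvShape g g := ⟨rfl, fun _ => rfl⟩

-- a single gather term of pvCountAdj
def pvCInd (grid : List (List Int)) (v : Int) (x y : Nat) (dy dx : Int) : Int :=
  if (dx ≠ 0 ∨ dy ≠ 0) ∧ 0 ≤ (x : Int) + dx ∧ (x : Int) + dx < pvW grid ∧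
     0 ≤ (y : Int) + dy ∧ (y : Int) + dy < (grid.length : Int) ∧
     pvRead grid ((y : Int) + dy) ((x : Int) + dx) = v then 1 else 0

theorem pvCountAdj_sum (grid : List (List Int)) (v : Int) (x y : Nat) :
    pvCountAdj grid v (x : Int) (y : Int)
      = (pvOffsets.map (fun dy => (pvOffsets.map (fun dx => pvCInd grid v x y dy dx)).sum)).sum := by
  unfold pvCountAdj
  rw [pvFoldl_add _ _ (fun dy => (pvOffsets.map (fun dx => pvCInd grid v x y dy dx)).sum)
      (fun c dy => by
        rw [pvFoldl_add _ _ (fun dx => pvCInd grid v x y dy dx)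
            (fun c' dx => by
              simp only [pvCInd]
              split_ifs <;> first | rfl | omega | simp_all)]
        try rfl)]
  simp

theorem pvSum_offs_neg (F : Int → Int) :
    (pvOffsets.map (fun d => F (-d))).sum = (pvOffsets.map F).sum := by
  norm_num [pvOffsets]; ring

-- the weight a source tile of value v pushes onto a town of value t
def pvWgt (v t : Int) : Int :=
  if v = 1 ∧ (t = 2 ∨ t = 5) then 3 else if v = 6 ∧ t = 5 then 5 else 0

-- bonus A adds at a town cell
def pvBonusA (grid : List (List Int)) (y x : Nat) : Int :=
  if (grid.getD y []).getD x 0 = 2 then 3 * pvCountAdj grid 1 (x : Int) (y : Int) + 5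
  else if (grid.getD y []).getD x 0 = 5 then
    3 * pvCountAdj grid 1 (x : Int) (y : Int) + 5 * pvCountAdj grid 6 (x : Int) (y : Int)
  else 0


-- flat +5 B's first loop adds at a type-2 cell
def pvBase (grid : List (List Int)) (y x : Nat) : Int :=
  if (grid.getD y []).getD x 0 = 2 then 5 else 0

-- the cell-delta contributed at target (y, x) by source cell (sy, sx) through offset (dy, dx)
def pvScatTerm (grid : List (List Int)) (sy sx : Nat) (dy dx : Int) (y x : Nat) : Int :=
  if (sy : Int) = (y : Int) - dy then
    (if (sx : Int) = (x : Int) - dx then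
      (if ¬(dy = 0 ∧ dx = 0) ∧ y < grid.length ∧ x < (grid.getD 0 []).length then
        pvWgt (pvCell grid sy sx) (pvCell grid y x) else 0) else 0) else 0

theorem pvTown_lt (grid : List (List Int)) (y x : Nat)
    (h2 : (grid.getD y []).getD x 0 = 2 ∨ (grid.getD y []).getD x 0 = 5) :
    y < grid.length ∧ x < (grid.getD y []).length := by
  have hnz : (grid.getD y []).getD x 0 ≠ 0 := by rcases h2 with h | h <;> rw [h] <;> omega
  constructor
  · by_contra hy
    have : grid.getD y [] = [] := by
      rw [List.getD_eq_getElem?_getD, List.getElem?_eq_none (by omega)]; rfl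
    rw [this] at hnz; exact hnz rfl
  · by_contra hx
    have : (grid.getD y []).getD x 0 = 0 := by
      rw [List.getD_eq_getElem?_getD, List.getElem?_eq_none (by omega)]; rfl
    exact hnz this

theorem pvRowlen_eq (grid : List (List Int))
    (hrect : ∀ row ∈ grid, row.length = (grid.getD 0 []).length)
    (y : Nat) (hy : y < grid.length) :
    (grid.getD y []).length = (grid.getD 0 []).length := by
  apply hrect
  rw [List.getD_eq_getElem?_getD, List.getElem?_eq_getElem hy]
  exact List.getElem_mem hy

-- the inner (column) step of port A, pointwise
theorem pvA_step (caps grid : List (List Int))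
    (htown : ∀ y < grid.length, ∀ x < (grid.getD y []).length,
      ((grid.getD y []).getD x 0 = 2 ∨ (grid.getD y []).getD x 0 = 5) →
      y < caps.length ∧ x < (caps.getD y []).length)
    (yi : Nat) (g : List (List Int)) (xi : Nat) (hsh : pvShape caps g) :
    pvShape caps
      (if (grid.getD yi []).getD xi 0 = 5 then
          pvAddAt (if (grid.getD yi []).getD xi 0 = 2 then
              pvAddAt g yi xi (3 * count_coast_adjacency grid (xi : Int) (yi : Int) + 5) else g) yi xi
            (3 * count_coast_adjacency grid (xi : Int) (yi : Int)
              + 5 * count_farmland_adjacency grid (xi : Int) (yi : Int))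
        else (if (grid.getD yi []).getD xi 0 = 2 then
              pvAddAt g yi xi (3 * count_coast_adjacency grid (xi : Int) (yi : Int) + 5) else g)) ∧
    ∀ y x, pvCell
      (if (grid.getD yi []).getD xi 0 = 5 then
          pvAddAt (if (grid.getD yi []).getD xi 0 = 2 then
              pvAddAt g yi xi (3 * count_coast_adjacency grid (xi : Int) (yi : Int) + 5) else g) yi xi
            (3 * count_coast_adjacency grid (xi : Int) (yi : Int)
              + 5 * count_farmland_adjacency grid (xi : Int) (yi : Int))
        else (if (grid.getD yi []).getD xi 0 = 2 then
              pvAddAt g yi xi (3 * count_coast_adjacency grid (xi : Int) (yi : Int) + 5) else g)) y x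
      = pvCell g y x + (if yi = y then (if xi = x then pvBonusA grid yi xi else 0) else 0) := by
  by_cases h2 : (grid.getD yi []).getD xi 0 = 2
  · have h5 : ¬ ((grid.getD yi []).getD xi 0 = 5) := by omega
    rw [if_neg h5, if_pos h2]
    have hin := pvTown_lt grid yi xi (Or.inl h2)
    have hc := htown yi hin.1 xi hin.2 (Or.inl h2)
    refine ⟨pvAddAt_shape caps g yi xi _ hsh, fun y x => ?_⟩
    by_cases hy : yi = y
    · by_cases hx : xi = x
      · subst hy; subst hx
        rw [pvAddAt_cell_self _ _ _ _ (by rw [hsh.1]; exact hc.1) (by rw [hsh.2 _]; exact hc.2),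
            if_pos rfl, if_pos rfl]
        congr 1
        unfold pvBonusA count_coast_adjacency
        rw [if_pos h2]
      · rw [pvAddAt_cell_ne _ _ _ _ _ _ (Or.inr (fun hh => hx hh.symm)), if_pos hy, if_neg hx]
        simp
    · rw [pvAddAt_cell_ne _ _ _ _ _ _ (Or.inl (fun hh => hy hh.symm)), if_neg hy]
      simp
  · by_cases h5 : (grid.getD yi []).getD xi 0 = 5
    · rw [if_pos h5, if_neg h2]
      have hin := pvTown_lt grid yi xi (Or.inr h5)
      have hc := htown yi hin.1 xi hin.2 (Or.inr h5)
      refine ⟨pvAddAt_shape caps g yi xi _ hsh, fun y x => ?_⟩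
      by_cases hy : yi = y
      · by_cases hx : xi = x
        · subst hy; subst hx
          rw [pvAddAt_cell_self _ _ _ _ (by rw [hsh.1]; exact hc.1) (by rw [hsh.2 _]; exact hc.2),
              if_pos rfl, if_pos rfl]
          congr 1
          unfold pvBonusA count_coast_adjacency count_farmland_adjacency
          rw [if_neg h2, if_pos h5]
        · rw [pvAddAt_cell_ne _ _ _ _ _ _ (Or.inr (fun hh => hx hh.symm)), if_pos hy, if_neg hx]
          simp
      · rw [pvAddAt_cell_ne _ _ _ _ _ _ (Or.inl (fun hh => hy hh.symm)), if_neg hy]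
        simp
    · rw [if_neg h5, if_neg h2]
      refine ⟨hsh, fun y x => ?_⟩
      have hb0 : pvBonusA grid yi xi = 0 := by unfold pvBonusA; rw [if_neg h2, if_neg h5]
      simp [hb0]

-- pointwise characterization of port A
theorem pvA_char (caps grid : List (List Int)) (f : Int)
    (hpre : Pre_update_population_caps caps grid f) :
    pvShape caps (update_population_caps caps grid f) ∧
    ∀ y x : Nat, pvCell (update_population_caps caps grid f) y x
      = pvCell caps y x
        + (if y < grid.length then
            (if x < (grid.getD y []).length then pvBonusA grid y x else 0) else 0) := by
  obtain ⟨hrect, htown⟩ := hpre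
  have H := pvFoldl_cell caps
      (fun pc y => (List.range ((grid.getD y []).length)).foldl (fun pc x =>
        let t := (grid.getD y []).getD x 0
        let pc1 := if t = 2 then pvAddAt pc y x (3 * count_coast_adjacency grid (x : Int) (y : Int) + 5) else pc
        if t = 5 then pvAddAt pc1 y x (3 * count_coast_adjacency grid (x : Int) (y : Int) + 5 * count_farmland_adjacency grid (x : Int) (y : Int)) else pc1) pc)
      (fun yi y x => if yi = y then (if x < (grid.getD yi []).length then pvBonusA grid yi x else 0) else 0)
      (fun g yi hg => by
        have Hi := pvFoldl_cell caps
          (fun pc x =>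
            let t := (grid.getD yi []).getD x 0
            let pc1 := if t = 2 then pvAddAt pc yi x (3 * count_coast_adjacency grid (x : Int) (yi : Int) + 5) else pc
            if t = 5 then pvAddAt pc1 yi x (3 * count_coast_adjacency grid (x : Int) (yi : Int) + 5 * count_farmland_adjacency grid (x : Int) (yi : Int)) else pc1)
          (fun xi y x => if yi = y then (if xi = x then pvBonusA grid yi xi else 0) else 0)
          (fun g2 xi hg2 => pvA_step caps grid htown yi g2 xi hg2)
          (List.range ((grid.getD yi []).length)) g hg
        refine ⟨Hi.1, fun y x => ?_⟩
        rw [Hi.2 y x, pvSum_if_const, pvSum_collapseN])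
      (List.range grid.length) caps (pvShape_refl caps)
  refine ⟨H.1, fun y x => ?_⟩
  rw [show update_population_caps caps grid f = (List.range grid.length).foldl _ caps from rfl]
  rw [H.2 y x, pvSum_collapseN]

-- the inner (column) step of B's base loop, pointwise
theorem pvBase_step (caps grid : List (List Int))
    (htown : ∀ y < grid.length, ∀ x < (grid.getD y []).length,
      ((grid.getD y []).getD x 0 = 2 ∨ (grid.getD y []).getD x 0 = 5) →
      y < caps.length ∧ x < (caps.getD y []).length)
    (yi : Nat) (g : List (List Int)) (xi : Nat) (hsh : pvShape caps g) :
    pvShape caps (if (grid.getD yi []).getD xi 0 = 2 then pvAddAt g yi xi 5 else g) ∧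
    ∀ y x, pvCell (if (grid.getD yi []).getD xi 0 = 2 then pvAddAt g yi xi 5 else g) y x
      = pvCell g y x + (if yi = y then (if xi = x then pvBase grid yi xi else 0) else 0) := by
  by_cases h2 : (grid.getD yi []).getD xi 0 = 2
  · rw [if_pos h2]
    have hin := pvTown_lt grid yi xi (Or.inl h2)
    have hc := htown yi hin.1 xi hin.2 (Or.inl h2)
    refine ⟨pvAddAt_shape caps g yi xi _ hsh, fun y x => ?_⟩
    by_cases hy : yi = y
    · by_cases hx : xi = x
      · subst hy; subst hx
        rw [pvAddAt_cell_self _ _ _ _ (by rw [hsh.1]; exact hc.1) (by rw [hsh.2 _]; exact hc.2),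
            if_pos rfl, if_pos rfl]
        congr 1
        unfold pvBase
        rw [if_pos h2]
      · rw [pvAddAt_cell_ne _ _ _ _ _ _ (Or.inr (fun hh => hx hh.symm)), if_pos hy, if_neg hx]
        simp
    · rw [pvAddAt_cell_ne _ _ _ _ _ _ (Or.inl (fun hh => hy hh.symm)), if_neg hy]
      simp
  · rw [if_neg h2]
    refine ⟨hsh, fun y x => ?_⟩
    have hb0 : pvBase grid yi xi = 0 := by unfold pvBase; rw [if_neg h2]
    simp [hb0]

-- the innermost (dx) step of B's scatter loop, pointwise
theorem pvScat_step (caps grid : List (List Int))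
    (hrect : ∀ row ∈ grid, row.length = (grid.getD 0 []).length)
    (htown : ∀ y < grid.length, ∀ x < (grid.getD y []).length,
      ((grid.getD y []).getD x 0 = 2 ∨ (grid.getD y []).getD x 0 = 5) →
      y < caps.length ∧ x < (caps.getD y []).length)
    (sy sx : Nat) (dy : Int) (g : List (List Int)) (dx : Int) (hsh : pvShape caps g) :
    pvShape caps
      (if dy = 0 ∧ dx = 0 then g
       else
        if 0 ≤ (sy : Int) + dy ∧ (sy : Int) + dy < (grid.length : Int) ∧
           0 ≤ (sx : Int) + dx ∧ (sx : Int) + dx < pvW grid then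
          (if (grid.getD sy []).getD sx 0 = 1 ∧
              (pvRead grid ((sy : Int) + dy) ((sx : Int) + dx) = 2 ∨
               pvRead grid ((sy : Int) + dy) ((sx : Int) + dx) = 5) then
            pvAddAt g ((sy : Int) + dy).toNat ((sx : Int) + dx).toNat 3
          else if (grid.getD sy []).getD sx 0 = 6 ∧
              pvRead grid ((sy : Int) + dy) ((sx : Int) + dx) = 5 then
            pvAddAt g ((sy : Int) + dy).toNat ((sx : Int) + dx).toNat 5
          else g)
        else g) ∧
    ∀ y x, pvCell
      (if dy = 0 ∧ dx = 0 then g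
       else
        if 0 ≤ (sy : Int) + dy ∧ (sy : Int) + dy < (grid.length : Int) ∧
           0 ≤ (sx : Int) + dx ∧ (sx : Int) + dx < pvW grid then
          (if (grid.getD sy []).getD sx 0 = 1 ∧
              (pvRead grid ((sy : Int) + dy) ((sx : Int) + dx) = 2 ∨
               pvRead grid ((sy : Int) + dy) ((sx : Int) + dx) = 5) then
            pvAddAt g ((sy : Int) + dy).toNat ((sx : Int) + dx).toNat 3
          else if (grid.getD sy []).getD sx 0 = 6 ∧
              pvRead grid ((sy : Int) + dy) ((sx : Int) + dx) = 5 then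
            pvAddAt g ((sy : Int) + dy).toNat ((sx : Int) + dx).toNat 5
          else g)
        else g) y x
      = pvCell g y x + pvScatTerm grid sy sx dy dx y x := by
  by_cases h00 : dy = 0 ∧ dx = 0
  · rw [if_pos h00]
    refine ⟨hsh, fun y x => ?_⟩
    have hz : pvScatTerm grid sy sx dy dx y x = 0 := by
      unfold pvScatTerm; split_ifs <;> first | rfl | tauto
    simp [hz]
  · rw [if_neg h00]
    by_cases hb : 0 ≤ (sy : Int) + dy ∧ (sy : Int) + dy < (grid.length : Int) ∧
        0 ≤ (sx : Int) + dx ∧ (sx : Int) + dx < pvW grid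
    · rw [if_pos hb]
      obtain ⟨a, hae⟩ : ∃ a : Nat, (sy : Int) + dy = (a : Int) :=
        ⟨((sy : Int) + dy).toNat, by omega⟩
      obtain ⟨b, hbe⟩ : ∃ b : Nat, (sx : Int) + dx = (b : Int) :=
        ⟨((sx : Int) + dx).toNat, by omega⟩
      rw [hae, hbe, pvRead_nonneg grid (a : Int) (b : Int) (by omega) (by omega)]
      simp only [Int.toNat_natCast]
      have hah : a < grid.length := by
        have := hb.2.1; rw [hae] at this; omega
      have hbw : b < (grid.getD 0 []).length := by
        have := hb.2.2.2; rw [hbe] at this; unfold pvW at this; omega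
      have hbrow : b < (grid.getD a []).length := by
        rw [pvRowlen_eq grid hrect a hah]; exact hbw
      by_cases hw1 : (grid.getD sy []).getD sx 0 = 1 ∧
          (pvCell grid a b = 2 ∨ pvCell grid a b = 5)
      · rw [if_pos hw1]
        have hc := htown a hah b hbrow hw1.2
        refine ⟨pvAddAt_shape caps g a b _ hsh, fun y x => ?_⟩
        by_cases hyx : y = a ∧ x = b
        · obtain ⟨rfl, rfl⟩ := hyx
          rw [pvAddAt_cell_self g y x _ (by rw [hsh.1]; exact hc.1) (by rw [hsh.2 y]; exact hc.2)]
          congr 1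
          unfold pvScatTerm pvWgt pvCell at *
          split_ifs <;> omega
        · rw [pvAddAt_cell_ne g a b _ y x (by omega)]
          have hz : pvScatTerm grid sy sx dy dx y x = 0 := by
            unfold pvScatTerm; split_ifs with c1 c2 c3 <;> try rfl
            exfalso; apply hyx
            constructor <;> omega
          simp [hz]
      · rw [if_neg hw1]
        by_cases hw2 : (grid.getD sy []).getD sx 0 = 6 ∧ pvCell grid a b = 5
        · rw [if_pos hw2]
          have hc := htown a hah b hbrow (Or.inr hw2.2)
          refine ⟨pvAddAt_shape caps g a b _ hsh, fun y x => ?_⟩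
          by_cases hyx : y = a ∧ x = b
          · obtain ⟨rfl, rfl⟩ := hyx
            rw [pvAddAt_cell_self g y x _ (by rw [hsh.1]; exact hc.1) (by rw [hsh.2 y]; exact hc.2)]
            congr 1
            unfold pvScatTerm pvWgt pvCell at *
            split_ifs <;> omega
          · rw [pvAddAt_cell_ne g a b _ y x (by omega)]
            have hz : pvScatTerm grid sy sx dy dx y x = 0 := by
              unfold pvScatTerm; split_ifs with c1 c2 c3 <;> try rfl
              exfalso; apply hyx
              constructor <;> omega
            simp [hz]
        · rw [if_neg hw2]
          refine ⟨hsh, fun y x => ?_⟩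
          have hz : pvScatTerm grid sy sx dy dx y x = 0 := by
            unfold pvScatTerm pvWgt
            split_ifs with c1 c2 c3 c4 c5 <;> try rfl
            · exfalso
              have hya : y = a := by omega
              have hxb : x = b := by omega
              subst hya; subst hxb
              unfold pvCell at *
              exact hw1 ⟨c4.1, c4.2⟩
            · exfalso
              have hya : y = a := by omega
              have hxb : x = b := by omega
              subst hya; subst hxb
              unfold pvCell at *
              exact hw2 ⟨c5.1, c5.2⟩
          simp [hz]
    · rw [if_neg hb]
      refine ⟨hsh, fun y x => ?_⟩
      have hz : pvScatTerm grid sy sx dy dx y x = 0 := by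
        unfold pvScatTerm pvW at *
        split_ifs with c1 c2 c3 <;> try rfl
        exfalso; apply hb
        refine ⟨by omega, by omega, by omega, by omega⟩
      simp [hz]

-- each scatter term vanishes when the source tile is neither sea nor farmland
theorem pvScatTerm_zero (grid : List (List Int)) (sy sx : Nat) (dy dx : Int) (y x : Nat)
    (hv : ¬ ((grid.getD sy []).getD sx 0 = 1 ∨ (grid.getD sy []).getD sx 0 = 6)) :
    pvScatTerm grid sy sx dy dx y x = 0 := by
  unfold pvScatTerm pvWgt pvCell
  split_ifs <;> first | rfl | omega

-- the middle (source-column) step of B's scatter loop, pointwise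
theorem pvSx_step (caps grid : List (List Int))
    (hrect : ∀ row ∈ grid, row.length = (grid.getD 0 []).length)
    (htown : ∀ y < grid.length, ∀ x < (grid.getD y []).length,
      ((grid.getD y []).getD x 0 = 2 ∨ (grid.getD y []).getD x 0 = 5) →
      y < caps.length ∧ x < (caps.getD y []).length)
    (syi : Nat) (g : List (List Int)) (sxi : Nat) (hg : pvShape caps g) :
    pvShape caps
      (if (grid.getD syi []).getD sxi 0 = 1 ∨ (grid.getD syi []).getD sxi 0 = 6 then
        pvOffsets.foldl (fun pc dy =>
          pvOffsets.foldl (fun pc dx =>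
            if dy = 0 ∧ dx = 0 then pc
            else
              if 0 ≤ (syi : Int) + dy ∧ (syi : Int) + dy < (grid.length : Int) ∧
                 0 ≤ (sxi : Int) + dx ∧ (sxi : Int) + dx < pvW grid then
                if (grid.getD syi []).getD sxi 0 = 1 ∧
                    (pvRead grid ((syi : Int) + dy) ((sxi : Int) + dx) = 2 ∨
                     pvRead grid ((syi : Int) + dy) ((sxi : Int) + dx) = 5) then
                  pvAddAt pc ((syi : Int) + dy).toNat ((sxi : Int) + dx).toNat 3
                else if (grid.getD syi []).getD sxi 0 = 6 ∧
                    pvRead grid ((syi : Int) + dy) ((sxi : Int) + dx) = 5 then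
                  pvAddAt pc ((syi : Int) + dy).toNat ((sxi : Int) + dx).toNat 5
                else pc
              else pc) pc) g
       else g) ∧
    ∀ y x, pvCell
      (if (grid.getD syi []).getD sxi 0 = 1 ∨ (grid.getD syi []).getD sxi 0 = 6 then
        pvOffsets.foldl (fun pc dy =>
          pvOffsets.foldl (fun pc dx =>
            if dy = 0 ∧ dx = 0 then pc
            else
              if 0 ≤ (syi : Int) + dy ∧ (syi : Int) + dy < (grid.length : Int) ∧
                 0 ≤ (sxi : Int) + dx ∧ (sxi : Int) + dx < pvW grid then
                if (grid.getD syi []).getD sxi 0 = 1 ∧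
                    (pvRead grid ((syi : Int) + dy) ((sxi : Int) + dx) = 2 ∨
                     pvRead grid ((syi : Int) + dy) ((sxi : Int) + dx) = 5) then
                  pvAddAt pc ((syi : Int) + dy).toNat ((sxi : Int) + dx).toNat 3
                else if (grid.getD syi []).getD sxi 0 = 6 ∧
                    pvRead grid ((syi : Int) + dy) ((sxi : Int) + dx) = 5 then
                  pvAddAt pc ((syi : Int) + dy).toNat ((sxi : Int) + dx).toNat 5
                else pc
              else pc) pc) g
       else g) y x
      = pvCell g y x + (pvOffsets.map (fun dy =>
          (pvOffsets.map (fun dx => pvScatTerm grid syi sxi dy dx y x)).sum)).sum := by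
  by_cases hv : (grid.getD syi []).getD sxi 0 = 1 ∨ (grid.getD syi []).getD sxi 0 = 6
  · rw [if_pos hv]
    have Hdy := pvFoldl_cell caps
      (fun pc dy =>
        pvOffsets.foldl (fun pc dx =>
          if dy = 0 ∧ dx = 0 then pc
          else
            if 0 ≤ (syi : Int) + dy ∧ (syi : Int) + dy < (grid.length : Int) ∧
               0 ≤ (sxi : Int) + dx ∧ (sxi : Int) + dx < pvW grid then
              if (grid.getD syi []).getD sxi 0 = 1 ∧
                  (pvRead grid ((syi : Int) + dy) ((sxi : Int) + dx) = 2 ∨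
                   pvRead grid ((syi : Int) + dy) ((sxi : Int) + dx) = 5) then
                pvAddAt pc ((syi : Int) + dy).toNat ((sxi : Int) + dx).toNat 3
              else if (grid.getD syi []).getD sxi 0 = 6 ∧
                  pvRead grid ((syi : Int) + dy) ((sxi : Int) + dx) = 5 then
                pvAddAt pc ((syi : Int) + dy).toNat ((sxi : Int) + dx).toNat 5
              else pc
            else pc) pc)
      (fun dyi y x => (pvOffsets.map (fun dx => pvScatTerm grid syi sxi dyi dx y x)).sum)
      (fun g3 dyi hg3 => by
        have Hdx := pvFoldl_cell caps
          (fun pc dx =>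
            if dyi = 0 ∧ dx = 0 then pc
            else
              if 0 ≤ (syi : Int) + dyi ∧ (syi : Int) + dyi < (grid.length : Int) ∧
                 0 ≤ (sxi : Int) + dx ∧ (sxi : Int) + dx < pvW grid then
                if (grid.getD syi []).getD sxi 0 = 1 ∧
                    (pvRead grid ((syi : Int) + dyi) ((sxi : Int) + dx) = 2 ∨
                     pvRead grid ((syi : Int) + dyi) ((sxi : Int) + dx) = 5) then
                  pvAddAt pc ((syi : Int) + dyi).toNat ((sxi : Int) + dx).toNat 3
                else if (grid.getD syi []).getD sxi 0 = 6 ∧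
                    pvRead grid ((syi : Int) + dyi) ((sxi : Int) + dx) = 5 then
                  pvAddAt pc ((syi : Int) + dyi).toNat ((sxi : Int) + dx).toNat 5
                else pc
              else pc)
          (fun dxi y x => pvScatTerm grid syi sxi dyi dxi y x)
          (fun g4 dxi hg4 => pvScat_step caps grid hrect htown syi sxi dyi g4 dxi hg4)
          pvOffsets g3 hg3
        exact ⟨Hdx.1, Hdx.2⟩)
      pvOffsets g hg
    exact ⟨Hdy.1, Hdy.2⟩
  · rw [if_neg hv]
    refine ⟨hg, fun y x => ?_⟩
    have hz : (pvOffsets.map (fun dy =>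
        (pvOffsets.map (fun dx => pvScatTerm grid syi sxi dy dx y x)).sum)).sum = 0 := by
      apply pvSum_zero
      intro dy _
      apply pvSum_zero
      intro dx _
      exact pvScatTerm_zero grid syi sxi dy dx y x hv
    simp [hz]

-- pointwise characterization of port B
theorem pvB_char (caps grid : List (List Int)) (f : Int)
    (hpre : Pre_update_population_caps caps grid f) :
    pvShape caps (update_population_caps_alt caps grid f) ∧
    ∀ y x : Nat, pvCell (update_population_caps_alt caps grid f) y x
      = pvCell caps y x
        + (if y < grid.length then
            (if x < (grid.getD y []).length then pvBase grid y x else 0) else 0)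
        + ((List.range grid.length).map (fun sy =>
            ((List.range ((grid.getD sy []).length)).map (fun sx =>
              (pvOffsets.map (fun dy =>
                (pvOffsets.map (fun dx => pvScatTerm grid sy sx dy dx y x)).sum)).sum)).sum)).sum := by
  obtain ⟨hrect, htown⟩ := hpre
  have HBase := pvFoldl_cell caps
      (fun pc y => (List.range ((grid.getD y []).length)).foldl (fun pc x =>
        if (grid.getD y []).getD x 0 = 2 then pvAddAt pc y x 5 else pc) pc)
      (fun yi y x => if yi = y then (if x < (grid.getD yi []).length then pvBase grid yi x else 0) else 0)
      (fun g yi hg => by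
        have Hi := pvFoldl_cell caps
          (fun pc x => if (grid.getD yi []).getD x 0 = 2 then pvAddAt pc yi x 5 else pc)
          (fun xi y x => if yi = y then (if xi = x then pvBase grid yi xi else 0) else 0)
          (fun g2 xi hg2 => pvBase_step caps grid htown yi g2 xi hg2)
          (List.range ((grid.getD yi []).length)) g hg
        refine ⟨Hi.1, fun y x => ?_⟩
        rw [Hi.2 y x, pvSum_if_const, pvSum_collapseN])
      (List.range grid.length) caps (pvShape_refl caps)
  have HScat := pvFoldl_cell caps
      (fun pc sy => (List.range ((grid.getD sy []).length)).foldl (fun pc sx =>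
        if (grid.getD sy []).getD sx 0 = 1 ∨ (grid.getD sy []).getD sx 0 = 6 then
          pvOffsets.foldl (fun pc dy =>
            pvOffsets.foldl (fun pc dx =>
              if dy = 0 ∧ dx = 0 then pc
              else
                if 0 ≤ (sy : Int) + dy ∧ (sy : Int) + dy < (grid.length : Int) ∧
                   0 ≤ (sx : Int) + dx ∧ (sx : Int) + dx < pvW grid then
                  if (grid.getD sy []).getD sx 0 = 1 ∧
                      (pvRead grid ((sy : Int) + dy) ((sx : Int) + dx) = 2 ∨
                       pvRead grid ((sy : Int) + dy) ((sx : Int) + dx) = 5) then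
                    pvAddAt pc ((sy : Int) + dy).toNat ((sx : Int) + dx).toNat 3
                  else if (grid.getD sy []).getD sx 0 = 6 ∧
                      pvRead grid ((sy : Int) + dy) ((sx : Int) + dx) = 5 then
                    pvAddAt pc ((sy : Int) + dy).toNat ((sx : Int) + dx).toNat 5
                  else pc
                else pc) pc) pc
        else pc) pc)
      (fun syi y x => ((List.range ((grid.getD syi []).length)).map (fun sx =>
        (pvOffsets.map (fun dy =>
          (pvOffsets.map (fun dx => pvScatTerm grid syi sx dy dx y x)).sum)).sum)).sum)
      (fun g syi hg => by
        have Hi := pvFoldl_cell caps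
          (fun pc sx =>
            if (grid.getD syi []).getD sx 0 = 1 ∨ (grid.getD syi []).getD sx 0 = 6 then
              pvOffsets.foldl (fun pc dy =>
                pvOffsets.foldl (fun pc dx =>
                  if dy = 0 ∧ dx = 0 then pc
                  else
                    if 0 ≤ (syi : Int) + dy ∧ (syi : Int) + dy < (grid.length : Int) ∧
                       0 ≤ (sx : Int) + dx ∧ (sx : Int) + dx < pvW grid then
                      if (grid.getD syi []).getD sx 0 = 1 ∧
                          (pvRead grid ((syi : Int) + dy) ((sx : Int) + dx) = 2 ∨
                           pvRead grid ((syi : Int) + dy) ((sx : Int) + dx) = 5) then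
                        pvAddAt pc ((syi : Int) + dy).toNat ((sx : Int) + dx).toNat 3
                      else if (grid.getD syi []).getD sx 0 = 6 ∧
                          pvRead grid ((syi : Int) + dy) ((sx : Int) + dx) = 5 then
                        pvAddAt pc ((syi : Int) + dy).toNat ((sx : Int) + dx).toNat 5
                      else pc
                    else pc) pc) pc
            else pc)
          (fun sxi y x => (pvOffsets.map (fun dy =>
            (pvOffsets.map (fun dx => pvScatTerm grid syi sxi dy dx y x)).sum)).sum)
          (fun g2 sxi hg2 => pvSx_step caps grid hrect htown syi g2 sxi hg2)
          (List.range ((grid.getD syi []).length)) g hg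
        exact ⟨Hi.1, Hi.2⟩)
      (List.range grid.length) _ HBase.1
  refine ⟨HScat.1, fun y x => ?_⟩
  rw [show update_population_caps_alt caps grid f
      = (List.range grid.length).foldl _ ((List.range grid.length).foldl _ caps) from rfl]
  rw [HScat.2 y x, HBase.2 y x, pvSum_collapseN]

theorem pvSwap4 (h w : Nat) (t : Nat → Nat → Int → Int → Int) :
    ((List.range h).map (fun sy => ((List.range w).map (fun sx =>
      (pvOffsets.map (fun dy => (pvOffsets.map (fun dx => t sy sx dy dx)).sum)).sum)).sum)).sum
    = (pvOffsets.map (fun dy => (pvOffsets.map (fun dx =>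
        ((List.range h).map (fun sy => ((List.range w).map (fun sx => t sy sx dy dx)).sum)).sum)).sum)).sum := by
  rw [congrArg List.sum (List.map_congr_left (fun sy _ =>
    pvSum_comm (List.range w) pvOffsets (fun sx dy => (pvOffsets.map (fun dx => t sy sx dy dx)).sum)))]
  rw [pvSum_comm (List.range h) pvOffsets
    (fun sy dy => ((List.range w).map (fun sx => (pvOffsets.map (fun dx => t sy sx dy dx)).sum)).sum)]
  refine congrArg List.sum (List.map_congr_left (fun dy _ => ?_))
  rw [congrArg List.sum (List.map_congr_left (fun sy _ =>
    pvSum_comm (List.range w) pvOffsets (fun sx dx => t sy sx dy dx)))]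
  exact pvSum_comm (List.range h) pvOffsets
    (fun sy dx => ((List.range w).map (fun sx => t sy sx dy dx)).sum)

-- for targets inside the grid: one scatter piece equals the matching gather terms
theorem pvPiece_eq (grid : List (List Int))
    (hrect : ∀ row ∈ grid, row.length = (grid.getD 0 []).length)
    (y x : Nat) (hy : y < grid.length) (hx : x < (grid.getD 0 []).length) (dy dx : Int) :
    (if 0 ≤ (y : Int) - dy ∧ (y : Int) - dy < (grid.length : Int) then
      (if 0 ≤ (x : Int) - dx ∧ (x : Int) - dx < ((grid.getD 0 []).length : Int) then
        (if ¬(dy = 0 ∧ dx = 0) ∧ y < grid.length ∧ x < (grid.getD 0 []).length then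
          pvWgt (pvCell grid ((y : Int) - dy).toNat ((x : Int) - dx).toNat) (pvCell grid y x) else 0)
       else 0) else 0)
    = 3 * (if pvCell grid y x = 2 ∨ pvCell grid y x = 5 then pvCInd grid 1 x y (-dy) (-dx) else 0)
      + 5 * (if pvCell grid y x = 5 then pvCInd grid 6 x y (-dy) (-dx) else 0) := by
  unfold pvCInd pvWgt pvW
  simp only [sub_eq_add_neg]
  by_cases hbnd : 0 ≤ (y : Int) + -dy ∧ (y : Int) + -dy < (grid.length : Int) ∧
      0 ≤ (x : Int) + -dx ∧ (x : Int) + -dx < ((grid.getD 0 []).length : Int)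
  · rw [pvRead_nonneg grid ((y : Int) + -dy) ((x : Int) + -dx) hbnd.1 hbnd.2.2.1]
    split_ifs <;> omega
  · split_ifs <;> omega

-- sums of gather terms over negated offsets equal the plain gather sums
theorem pvCIndNeg (grid : List (List Int)) (v : Int) (x y : Nat) :
    (pvOffsets.map (fun dy => (pvOffsets.map (fun dx => pvCInd grid v x y (-dy) (-dx))).sum)).sum
      = (pvOffsets.map (fun dy => (pvOffsets.map (fun dx => pvCInd grid v x y dy dx)).sum)).sum := by
  rw [congrArg List.sum (List.map_congr_left (fun dy _ =>
    pvSum_offs_neg (fun d => pvCInd grid v x y (-dy) d)))]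
  exact pvSum_offs_neg (fun d => (pvOffsets.map (fun dx => pvCInd grid v x y d dx)).sum)

-- the central identity: per-town gather bonus = flat base + total scattered weight
theorem pvKey (grid : List (List Int))
    (hrect : ∀ row ∈ grid, row.length = (grid.getD 0 []).length) (y x : Nat) :
    (if y < grid.length then (if x < (grid.getD y []).length then pvBonusA grid y x else 0) else 0)
      = (if y < grid.length then (if x < (grid.getD y []).length then pvBase grid y x else 0) else 0)
        + ((List.range grid.length).map (fun sy =>
            ((List.range ((grid.getD sy []).length)).map (fun sx =>
              (pvOffsets.map (fun dy =>
                (pvOffsets.map (fun dx => pvScatTerm grid sy sx dy dx y x)).sum)).sum)).sum)).sum := by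
  -- rows all have width (grid.getD 0 []).length
  rw [congrArg List.sum (List.map_congr_left (fun sy hsy => by
    rw [pvRowlen_eq grid hrect sy (List.mem_range.mp hsy)]))]
  rw [pvSwap4 grid.length ((grid.getD 0 []).length) (fun sy sx dy dx => pvScatTerm grid sy sx dy dx y x)]
  -- collapse the source sums for each offset
  have hcol : ∀ dy dx : Int,
      ((List.range grid.length).map (fun sy =>
        ((List.range ((grid.getD 0 []).length)).map (fun sx => pvScatTerm grid sy sx dy dx y x)).sum)).sum
      = (if 0 ≤ (y : Int) - dy ∧ (y : Int) - dy < (grid.length : Int) then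
          (if 0 ≤ (x : Int) - dx ∧ (x : Int) - dx < ((grid.getD 0 []).length : Int) then
            (if ¬(dy = 0 ∧ dx = 0) ∧ y < grid.length ∧ x < (grid.getD 0 []).length then
              pvWgt (pvCell grid ((y : Int) - dy).toNat ((x : Int) - dx).toNat) (pvCell grid y x) else 0)
           else 0) else 0) := by
    intro dy dx
    have hin : ∀ sy : Nat,
        ((List.range ((grid.getD 0 []).length)).map (fun sx => pvScatTerm grid sy sx dy dx y x)).sum
        = if (sy : Int) = (y : Int) - dy then
            (if 0 ≤ (x : Int) - dx ∧ (x : Int) - dx < ((grid.getD 0 []).length : Int) then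
              (if ¬(dy = 0 ∧ dx = 0) ∧ y < grid.length ∧ x < (grid.getD 0 []).length then
                pvWgt (pvCell grid sy ((x : Int) - dx).toNat) (pvCell grid y x) else 0)
             else 0) else 0 := by
      intro sy
      simp only [pvScatTerm]
      rw [pvSum_if_const, pvSum_collapseZ]
    rw [congrArg List.sum (List.map_congr_left (fun sy _ => hin sy)), pvSum_collapseZ]
  rw [congrArg List.sum (List.map_congr_left (fun dy _ =>
    congrArg List.sum (List.map_congr_left (fun dx _ => hcol dy dx))))]
  by_cases hyx : y < grid.length ∧ x < (grid.getD 0 []).length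
  · obtain ⟨hy, hx⟩ := hyx
    rw [congrArg List.sum (List.map_congr_left (fun dy _ =>
      congrArg List.sum (List.map_congr_left (fun dx _ => pvPiece_eq grid hrect y x hy hx dy dx))))]
    have hdist : ∀ dy : Int,
        (pvOffsets.map (fun dx =>
          3 * (if pvCell grid y x = 2 ∨ pvCell grid y x = 5 then pvCInd grid 1 x y (-dy) (-dx) else 0)
          + 5 * (if pvCell grid y x = 5 then pvCInd grid 6 x y (-dy) (-dx) else 0))).sum
        = 3 * (if pvCell grid y x = 2 ∨ pvCell grid y x = 5 then
                (pvOffsets.map (fun dx => pvCInd grid 1 x y (-dy) (-dx))).sum else 0)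
          + 5 * (if pvCell grid y x = 5 then
                (pvOffsets.map (fun dx => pvCInd grid 6 x y (-dy) (-dx))).sum else 0) := by
      intro dy
      rw [pvSum_add, pvSum_mul, pvSum_mul, pvSum_if_const, pvSum_if_const]
    rw [congrArg List.sum (List.map_congr_left (fun dy _ => hdist dy))]
    rw [pvSum_add, pvSum_mul, pvSum_mul, pvSum_if_const, pvSum_if_const]
    rw [show (pvOffsets.map (fun dy => (pvOffsets.map (fun dx => pvCInd grid 1 x y (-dy) (-dx))).sum)).sum
        = (pvOffsets.map (fun dy => (pvOffsets.map (fun dx => pvCInd grid 1 x y dy dx)).sum)).sum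
      from pvCIndNeg grid 1 x y]
    rw [show (pvOffsets.map (fun dy => (pvOffsets.map (fun dx => pvCInd grid 6 x y (-dy) (-dx))).sum)).sum
        = (pvOffsets.map (fun dy => (pvOffsets.map (fun dx => pvCInd grid 6 x y dy dx)).sum)).sum
      from pvCIndNeg grid 6 x y]
    rw [← pvCountAdj_sum grid 1 x y, ← pvCountAdj_sum grid 6 x y]
    have hxr : x < (grid.getD y []).length := by rw [pvRowlen_eq grid hrect y hy]; exact hx
    rw [if_pos hy, if_pos hxr, if_pos hy, if_pos hxr]
    unfold pvBonusA pvBase pvCell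
    by_cases h2 : (grid.getD y []).getD x 0 = 2
    · rw [h2]; norm_num; ring
    · by_cases h5 : (grid.getD y []).getD x 0 = 5
      · rw [h5]; norm_num
      · rw [if_neg h2, if_neg h2, if_neg h5, if_neg h5,
            if_neg (show ¬((grid.getD y []).getD x 0 = 2 ∨ (grid.getD y []).getD x 0 = 5) from by tauto)]
        norm_num
  · have hz : ∀ dy : Int,
        (pvOffsets.map (fun dx =>
          (if 0 ≤ (y : Int) - dy ∧ (y : Int) - dy < (grid.length : Int) then
            (if 0 ≤ (x : Int) - dx ∧ (x : Int) - dx < ((grid.getD 0 []).length : Int) then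
              (if ¬(dy = 0 ∧ dx = 0) ∧ y < grid.length ∧ x < (grid.getD 0 []).length then
                pvWgt (pvCell grid ((y : Int) - dy).toNat ((x : Int) - dx).toNat) (pvCell grid y x) else 0)
             else 0) else 0))).sum = 0 := by
      intro dy
      apply pvSum_zero
      intro dx _
      split_ifs <;> first | rfl | tauto
    rw [congrArg List.sum (List.map_congr_left (fun dy _ => hz dy))]
    have h0 : ((pvOffsets.map (fun _ => (0 : Int))).sum) = 0 := by simp
    rw [h0]
    by_cases hy : y < grid.length
    · have hxr : ¬ x < (grid.getD y []).length := by
        rw [pvRowlen_eq grid hrect y hy]; tauto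
      rw [if_pos hy, if_pos hy, if_neg hxr, if_neg hxr]
      ring
    · rw [if_neg hy, if_neg hy]
      ring

-- two grids with equal row structure and equal cells are equal
theorem pvGrid_ext (g1 g2 : List (List Int)) (h1 : g1.length = g2.length)
    (h2 : ∀ y : Nat, (g1.getD y []).length = (g2.getD y []).length)
    (h3 : ∀ y x : Nat, pvCell g1 y x = pvCell g2 y x) : g1 = g2 := by
  apply List.ext_getElem h1
  intro y hy1 hy2
  have e1 : g1.getD y [] = g1[y] := by
    rw [List.getD_eq_getElem?_getD, List.getElem?_eq_getElem hy1]; rfl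
  have e2 : g2.getD y [] = g2[y] := by
    rw [List.getD_eq_getElem?_getD, List.getElem?_eq_getElem hy2]; rfl
  apply List.ext_getElem (by rw [← e1, ← e2]; exact h2 y)
  intro x hx1 hx2
  have hc := h3 y x
  unfold pvCell at hc
  rw [e1, e2, List.getD_eq_getElem?_getD, List.getD_eq_getElem?_getD,
      List.getElem?_eq_getElem hx1, List.getElem?_eq_getElem hx2] at hc
  exact hc

-- ===== VERDICT (by name: the statement is the Claim_ definition above) =====
theorem update_population_caps_spec : Claim_equal_update_population_caps := by
  intro caps grid f _hdom hpre
  unfold Spec_update_population_caps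
  have HA := pvA_char caps grid f hpre
  have HB := pvB_char caps grid f hpre
  apply pvGrid_ext
  · rw [HA.1.1, HB.1.1]
  · intro y; rw [HA.1.2 y, HB.1.2 y]
  · intro y x
    rw [HA.2 y x, HB.2 y x, pvKey grid hpre.1 y x]
    ring
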